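-- pv_equiv track=rewrite | github.com/trevphil/password-permutor | permutor.py | swap_letters_for_symbols
-- ===== SOURCE A (Python) =====
-- def swap_letters_for_symbols(word):
--     replacements = {
--         'e': '3', 'E': '3',
--         'a': '@', 'A': '@',
--         'i': '!', 'I': '!',
--         's': '$', 'S': '$',
--         'i': '1', 'L': '1',
--         'o': '0', 'O': '0'
--     }
--
--     words = set([word])
--     for idx, char in enumerate(list(word)):
--         if char in replacements:
--             new_words = set()
--             for w in words:
--                 mutated = w[:idx] + replacements[char] + w[(idx + 1):]
--                 new_words.add(mutated)
--             words = words.union(new_words)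
--
--     return words
-- ===== SOURCE B (Python) =====
-- def swap_letters_for_symbols(word):
--     replacements = {
--         'e': '3', 'E': '3',
--         'a': '@', 'A': '@',
--         'i': '!', 'I': '!',
--         's': '$', 'S': '$',
--         'i': '1', 'L': '1',
--         'o': '0', 'O': '0'
--     }
--
--     variants = ['']
--     for char in word:
--         if char in replacements:
--             symbol = replacements[char]
--             variants = [v + char for v in variants] + [v + symbol for v in variants]
--         else:
--             variants = [v + char for v in variants]
--     return set(variants)
-- ===== Notes on version B (the rewrite author's own statement) =====
-- stated objective: simpler
-- what changed: Instead of A's incremental doubling of a set of full words (slicing every accumulated word at each replaceable index and unioning in the mutated copies), B makes one left-to-right pass that extends each variant prefix by the current character and, when replaceable, also by its symbol, then returns the set of the resulting variants.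
import Mathlib
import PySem

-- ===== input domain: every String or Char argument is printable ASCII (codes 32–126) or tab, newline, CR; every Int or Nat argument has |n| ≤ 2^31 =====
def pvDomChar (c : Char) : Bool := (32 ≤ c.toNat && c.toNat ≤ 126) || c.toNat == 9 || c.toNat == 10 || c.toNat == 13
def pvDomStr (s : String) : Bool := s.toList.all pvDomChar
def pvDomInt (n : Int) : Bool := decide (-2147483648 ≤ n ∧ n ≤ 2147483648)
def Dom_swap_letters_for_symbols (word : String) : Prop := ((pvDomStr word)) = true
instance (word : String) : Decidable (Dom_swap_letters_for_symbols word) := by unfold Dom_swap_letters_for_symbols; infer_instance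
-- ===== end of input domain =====

-- B replaces A's incremental set-union doubling (slicing every word at every replaceable index)
-- by a single left-to-right pass that extends each variant prefix by one character (objective: simpler).

-- the replacements dict literal shared verbatim by both Pythons (duplicate key 'i' resolved by overwrite, as in Python)
def pvRepl : PySem.Dict Char Char :=
  PySem.Dict.ofList [('e','3'),('E','3'),('a','@'),('A','@'),('i','!'),('I','!'),
                     ('s','$'),('S','$'),('i','1'),('L','1'),('o','0'),('O','0')]

-- ===== PORT A =====
-- body of A's 'for idx, char in enumerate(list(word))' loop (new_words inlined into the union)
def swapStepA (words : PySem.Set (List Char)) (p : Int × Char) : PySem.Set (List Char) :=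
  if pvRepl.contains p.2 then
    PySem.Set.union words
      (words.foldl (fun nw w =>
        PySem.Set.add nw (PySem.List.slice w none (some p.1) ++ [pvRepl.getD p.2 p.2]
          ++ PySem.List.slice w (some (p.1 + 1)) none)) PySem.Set.empty)
  else words

def swap_letters_for_symbols (word : String) : List String :=
  ((PySem.List.enumerate word.toList 0).foldl swapStepA
      (PySem.Set.ofList [word.toList])).map String.ofList

-- ===== PORT B =====
-- body of B's 'for char in word' loop: extend every variant by the char, and by its symbol if replaceable
def swapStepB (vs : List (List Char)) (c : Char) : List (List Char) :=
  if pvRepl.contains c then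
    vs.map (· ++ [c]) ++ vs.map (· ++ [pvRepl.getD c c])
  else
    vs.map (· ++ [c])

def swap_letters_for_symbols_alt (word : String) : List String :=
  (PySem.Set.ofList (word.toList.foldl swapStepB [[]])).map String.ofList

-- ===== PRECONDITION & SPEC =====
def Spec_swap_letters_for_symbols (word : String) (out : List String) : Prop := out = swap_letters_for_symbols_alt word
instance (word : String) (out : List String) : Decidable (Spec_swap_letters_for_symbols word out) := by unfold Spec_swap_letters_for_symbols; infer_instance

-- ===== CLAIM (what is proved, stated in full; the proofs are below) =====
def Claim_equal_swap_letters_for_symbols : Prop := ∀ (word : String), Dom_swap_letters_for_symbols word → Spec_swap_letters_for_symbols word (swap_letters_for_symbols word)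

-- ===== LEMMAS AND PROOFS =====

-- the resolved dict literal never maps a character to itself
lemma pvRepl_ne (c : Char) (h : pvRepl.contains c = true) : pvRepl.getD c c ≠ c := by
  rw [show pvRepl = PySem.Dict.mk [('e','3'),('E','3'),('a','@'),('A','@'),('i','1'),('I','!'),
        ('s','$'),('S','$'),('L','1'),('o','0'),('O','0')] from rfl] at h ⊢
  rw [PySem.Dict.contains_mk] at h
  simp at h
  rcases h with h|h|h|h|h|h|h|h|h|h|h <;> subst h <;> decide

-- set(xs) of a duplicate-free list is the list itself
lemma pvOfList_self {α : Type} [BEq α] [LawfulBEq α] (xs : List α) (h : xs.Nodup) :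
    PySem.Set.ofList xs = xs := by
  have hd : ∀ x ∈ xs, x ∉ (PySem.Set.empty : PySem.Set α) := by
    intro x _ hx; simp [PySem.Set.empty] at hx
  have := PySem.Set.update_eq_append_of_disjoint PySem.Set.empty xs h hd
  simpa [PySem.Set.update, PySem.Set.ofList, PySem.Set.empty] using this

-- one B step keeps all variants the same length and duplicate-free
lemma stepB_facts (c : Char) (k : Nat) (vs : List (List Char))
    (hlen : ∀ v ∈ vs, v.length = k) (hnd : vs.Nodup) :
    (∀ v ∈ swapStepB vs c, v.length = k + 1) ∧ (swapStepB vs c).Nodup := by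
  unfold swapStepB
  by_cases hc : pvRepl.contains c = true
  · rw [if_pos hc]
    refine ⟨?_, ?_⟩
    · intro v hv
      rcases List.mem_append.1 hv with h | h <;>
        · rcases List.mem_map.1 h with ⟨u, hu, rfl⟩
          simp [hlen u hu]
    · have hr := pvRepl_ne c hc
      refine List.Nodup.append (hnd.map (List.append_left_injective [c]))
        (hnd.map (List.append_left_injective [pvRepl.getD c c])) ?_
      intro x hx hx2
      rcases List.mem_map.1 hx with ⟨u, hu, rfl⟩
      rcases List.mem_map.1 hx2 with ⟨u', hu', he⟩
      have hl : u'.length = u.length := by rw [hlen u' hu', hlen u hu]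
      have := (List.append_inj he hl).2
      exact hr (List.singleton_injective this)
  · rw [if_neg hc]
    exact ⟨fun v hv => by rcases List.mem_map.1 hv with ⟨u, hu, rfl⟩; simp [hlen u hu],
      hnd.map (List.append_left_injective [c])⟩

-- B's whole fold keeps the variant list duplicate-free (and tracks lengths)
lemma foldB_facts (rest : List Char) : ∀ (k : Nat) (vs : List (List Char)),
    (∀ v ∈ vs, v.length = k) → vs.Nodup →
    (∀ v ∈ rest.foldl swapStepB vs, v.length = k + rest.length) ∧ (rest.foldl swapStepB vs).Nodup := by
  induction rest with
  | nil => intro k vs h1 h2; simpa using ⟨h1, h2⟩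
  | cons c rest ih =>
    intro k vs h1 h2
    obtain ⟨h1', h2'⟩ := stepB_facts c k vs h1 h2
    obtain ⟨ih1, ih2⟩ := ih (k + 1) _ h1' h2'
    refine ⟨?_, by simpa using ih2⟩
    intro v hv
    have := ih1 v (by simpa using hv)
    simp only [List.length_cons]
    omega

-- one A step on words of the form v ++ (c :: rest) is one B step on the prefixes v
lemma stepA_eq (k : Nat) (c : Char) (rest : List Char) (vs : List (List Char))
    (hlen : ∀ v ∈ vs, v.length = k) (hnd : vs.Nodup) :
    swapStepA (vs.map (· ++ (c :: rest))) ((k : Int), c)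
      = (swapStepB vs c).map (· ++ rest) := by
  unfold swapStepA swapStepB
  by_cases hc : pvRepl.contains c = true
  · rw [if_pos hc, if_pos hc]
    set r := pvRepl.getD c c with hrdef
    have hr : r ≠ c := pvRepl_ne c hc
    -- the mutated word of v ++ c :: rest is (v ++ [r]) ++ rest
    have hmut : ∀ (nw : PySem.Set (List Char)), ∀ v ∈ vs,
        PySem.Set.add nw (PySem.List.slice (v ++ c :: rest) none (some (k : Int)) ++ [r]
          ++ PySem.List.slice (v ++ c :: rest) (some ((k : Int) + 1)) none)
        = PySem.Set.add nw ((v ++ [r]) ++ rest) := by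
      intro nw v hv
      have hv' := hlen v hv
      rw [PySem.List.slice_to_natCast, show ((k : Int) + 1) = ((k + 1 : Nat) : Int) by push_cast; ring,
        PySem.List.slice_from_natCast]
      have ht : List.take k (v ++ c :: rest) = v := by rw [← hv']; exact List.take_left
      have hd : List.drop (k + 1) (v ++ c :: rest) = rest := by
        rw [show v ++ c :: rest = (v ++ [c]) ++ rest by simp,
          show k + 1 = (v ++ [c]).length by simp [hv']]
        exact List.drop_left
      rw [ht, hd]
    -- the inner fold builds exactly the list of mutated words
    have hnodupL : (vs.map (fun v => (v ++ [r]) ++ rest)).Nodup := by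
      refine hnd.map ?_
      intro a b h
      exact List.append_left_injective [r] (List.append_left_injective rest h)
    have hfold : (vs.map (· ++ (c :: rest))).foldl (fun nw w =>
        PySem.Set.add nw (PySem.List.slice w none (some ((k : Int), c).1) ++ [r]
          ++ PySem.List.slice w (some (((k : Int), c).1 + 1)) none)) PySem.Set.empty
        = vs.map (fun v => (v ++ [r]) ++ rest) := by
      rw [List.foldl_map, PySem.List.foldl_congr_mem vs _
        (fun nw v => PySem.Set.add nw ((v ++ [r]) ++ rest)) _ hmut,
        ← List.foldl_map (f := fun v => (v ++ [r]) ++ rest) (g := PySem.Set.add),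
        show List.foldl PySem.Set.add PySem.Set.empty (vs.map (fun v => (v ++ [r]) ++ rest))
          = PySem.Set.ofList (vs.map (fun v => (v ++ [r]) ++ rest)) from rfl]
      exact pvOfList_self _ hnodupL
    rw [hfold]
    -- the mutated words are all new, so the union is an append
    have hdisj : ∀ x ∈ vs.map (fun v => (v ++ [r]) ++ rest), x ∉ vs.map (· ++ (c :: rest)) := by
      intro x hx hx2
      rcases List.mem_map.1 hx with ⟨v, hv, rfl⟩
      rcases List.mem_map.1 hx2 with ⟨u, hu, he⟩
      have he' : (u ++ [c]) ++ rest = (v ++ [r]) ++ rest := by simpa [List.append_assoc] using he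
      have h1 : u ++ [c] = v ++ [r] :=
        (List.append_inj he' (by simp [hlen u hu, hlen v hv])).1
      have h2 : [c] = ([r] : List Char) :=
        (List.append_inj h1 (by rw [hlen u hu, hlen v hv])).2
      exact hr (List.singleton_injective h2).symm
    rw [show PySem.Set.union (vs.map (· ++ (c :: rest))) (vs.map (fun v => (v ++ [r]) ++ rest))
        = PySem.Set.update (vs.map (· ++ (c :: rest))) (vs.map (fun v => (v ++ [r]) ++ rest)) from rfl,
      PySem.Set.update_eq_append_of_disjoint _ _ hnodupL hdisj]
    simp [List.map_map, Function.comp_def, List.append_assoc]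
  · rw [if_neg hc, if_neg hc]
    simp [List.map_map, Function.comp_def, List.append_assoc]

-- main invariant: A's loop over enumerate(rest, k) starting from the words v ++ rest
-- computes B's loop over rest starting from the prefixes v
lemma loop_eq (rest : List Char) : ∀ (k : Nat) (vs : List (List Char)),
    (∀ v ∈ vs, v.length = k) → vs.Nodup →
    (PySem.List.enumerate rest (k : Int)).foldl swapStepA (vs.map (· ++ rest))
      = rest.foldl swapStepB vs := by
  induction rest with
  | nil => intro k vs _ _; simp [PySem.List.enumerate_nil]
  | cons c rest ih =>
    intro k vs hlen hnd
    rw [PySem.List.enumerate_cons, List.foldl_cons, stepA_eq k c rest vs hlen hnd,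
      show ((k : Int) + 1) = ((k + 1 : Nat) : Int) by push_cast; ring]
    obtain ⟨hlen', hnd'⟩ := stepB_facts c k vs hlen hnd
    rw [ih (k + 1) (swapStepB vs c) hlen' hnd', List.foldl_cons]

-- ===== VERDICT (by name: the statement is the Claim_ definition above) =====
theorem swap_letters_for_symbols_spec : Claim_equal_swap_letters_for_symbols := by
  intro word _
  unfold Spec_swap_letters_for_symbols swap_letters_for_symbols swap_letters_for_symbols_alt
  have hlen : ∀ v ∈ ([[]] : List (List Char)), v.length = 0 := by simp
  have hnd : ([[]] : List (List Char)).Nodup := by simp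
  have hloop := loop_eq word.toList 0 [[]] hlen hnd
  simp only [Nat.cast_zero] at hloop
  rw [pvOfList_self [word.toList] (by simp),
    show ([word.toList] : List (List Char)) = ([[]] : List (List Char)).map (· ++ word.toList) by simp,
    hloop, pvOfList_self _ (foldB_facts word.toList 0 [[]] hlen hnd).2]
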